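-- pv_equiv track=rewrite | github.com/kafuuchino-desu/calc-pp | calc_pp/calculator.py | parseVariables
-- ===== SOURCE A (Python) =====
-- operators = ["+", "-", "*", "/", "(", ")"]
--
-- def parseVariables(expression: str):
-- 	varList = []
-- 	flagMatching = False
-- 	variable = ""
-- 	if "$" in expression:
-- 		for i in expression:
-- 			if i == "$":
-- 				variable = ""
-- 				flagMatching = True
-- 			elif (i in operators) and flagMatching:
-- 				varList.append(variable)
-- 				flagMatching = False
-- 				variable = ""
-- 			#skip spaces in expressions
-- 			elif flagMatching and (i != " "):
-- 				variable += i
-- 		#append the variable if expression ends with a variable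
-- 		if variable != "":
-- 			varList.append(variable)
-- 	return varList
-- ===== SOURCE B (Python) =====
-- operators = ["+", "-", "*", "/", "(", ")"]
--
-- def parseVariables(expression: str):
--     segs = expression.split("$")[1:]
--     result = []
--     for idx, seg in enumerate(segs):
--         var = ""
--         found = False
--         for ch in seg:
--             if ch in operators:
--                 found = True
--                 break
--             if ch != " ":
--                 var += ch
--         if found:
--             result.append(var)
--         elif idx == len(segs) - 1 and var != "":
--             result.append(var)
--     return result
-- ===== Notes on version B (the rewrite author's own statement) =====
-- stated objective: simpler
-- what changed: B replaces A's single stateful scan (flagMatching/variable accumulator over the whole string) by splitting the expression at the variable markers and scanning each resulting segment independently up to its first operator, keeping an operator-less variable only for the last segment.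
import Mathlib
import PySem

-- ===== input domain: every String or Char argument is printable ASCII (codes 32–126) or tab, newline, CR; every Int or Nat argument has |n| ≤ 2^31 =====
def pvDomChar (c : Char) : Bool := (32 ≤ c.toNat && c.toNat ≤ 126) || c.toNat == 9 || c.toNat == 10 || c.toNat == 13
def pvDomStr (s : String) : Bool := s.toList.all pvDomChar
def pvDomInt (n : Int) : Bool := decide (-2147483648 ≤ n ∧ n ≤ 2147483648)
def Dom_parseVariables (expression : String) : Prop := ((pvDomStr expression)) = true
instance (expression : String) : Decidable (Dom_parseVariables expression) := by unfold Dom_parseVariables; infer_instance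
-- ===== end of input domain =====

-- B replaces A's global flag/accumulator scan by splitting at the variable markers and scanning each segment
-- up to its first operator (objective: simpler decomposition; same cost).

-- ===== PORT A =====
def pvOps : List Char := ['+', '-', '*', '/', '(', ')']

-- one loop iteration of A: state = (varList, flagMatching, variable)
def pvStepA (st : List (List Char) × Bool × List Char) (c : Char) :
    List (List Char) × Bool × List Char :=
  if c = '$' then (st.1, true, [])
  else if c ∈ pvOps ∧ st.2.1 = true then (st.1 ++ [st.2.2], false, [])
  else if st.2.1 = true ∧ c ≠ ' ' then (st.1, st.2.1, st.2.2 ++ [c]) else st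

def parseVariables (expression : String) : List String :=
  if PySem.Str.isIn "$" expression then
    let st := expression.toList.foldl pvStepA ([], false, [])
    (if st.2.2 ≠ [] then st.1 ++ [st.2.2] else st.1).map String.mk
  else []

-- ===== PORT B =====
-- scan one '$'-segment: collected non-space chars before the first operator, and
-- whether an operator occurs in the segment
def pvSegVar : List Char → List Char × Bool
  | [] => ([], false)
  | c :: rest =>
    if c ∈ pvOps then ([], true)
    else
      let (w, f) := pvSegVar rest
      (if c = ' ' then w else c :: w, f)

-- Source B's loop over the segments; the last segment keeps an operator-less variable
def pvGoB : List (List Char) → List String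
  | [] => []
  | seg :: rest =>
    let (w, f) := pvSegVar seg
    if f then String.mk w :: pvGoB rest
    else if rest = [] ∧ w ≠ [] then [String.mk w]
    else pvGoB rest

def parseVariables_alt (expression : String) : List String :=
  pvGoB ((PySem.Chars.splitOn expression.toList ['$']).drop 1)

-- ===== PRECONDITION & SPEC =====
def Spec_parseVariables (expression : String) (out : List String) : Prop := out = parseVariables_alt expression
instance (expression : String) (out : List String) : Decidable (Spec_parseVariables expression out) := by unfold Spec_parseVariables; infer_instance

-- ===== CLAIM (what is proved, stated in full; the proofs are below) =====
def Claim_equal_parseVariables : Prop := ∀ (expression : String), Dom_parseVariables expression → Spec_parseVariables expression (parseVariables expression)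

-- ===== LEMMAS AND PROOFS =====

-- structural single-char split: (first part, remaining parts)
def pvSplit : List Char → List Char × List (List Char)
  | [] => ([], [])
  | c :: rest =>
    let (h, t) := pvSplit rest
    if c = '$' then ([], h :: t) else (c :: h, t)

-- B's treatment of the current segment when entered with pending variable v
def pvB2 (v h : List Char) (t : List (List Char)) : List String :=
  let (w, f) := pvSegVar h
  if f then String.mk (v ++ w) :: pvGoB t
  else if t = [] then (if v ++ w ≠ [] then [String.mk (v ++ w)] else [])
  else pvGoB t

-- A's trailing append + conversion to strings
def pvFin (st : List (List Char) × Bool × List Char) : List String :=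
  (if st.2.2 ≠ [] then st.1 ++ [st.2.2] else st.1).map String.mk

lemma pvGoB_eq_B2 (h : List Char) (t : List (List Char)) :
    pvGoB (h :: t) = pvB2 [] h t := by
  simp only [pvGoB, pvB2, List.nil_append]
  obtain ⟨w, f⟩ := pvSegVar h
  cases f with
  | true => cases t <;> simp
  | false =>
    cases t with
    | nil => by_cases hw : w = [] <;> simp [hw, pvGoB]
    | cons a b => simp

lemma pvSplit_go (fuel : Nat) : ∀ (l cur : List Char) (acc : List (List Char)),
    l.length < fuel →
    PySem.Chars.splitOn.go ['$'] fuel l cur acc =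
      acc.reverse ++ (cur.reverse ++ (pvSplit l).1) :: (pvSplit l).2 := by
  induction fuel with
  | zero => intro l cur acc h; omega
  | succ n ih =>
    intro l cur acc h
    cases l with
    | nil =>
      rw [PySem.Chars.splitOn.go]
      simp [pvSplit]
      omega
    | cons c rest =>
      by_cases hc : c = '$'
      · subst hc
        rw [PySem.Chars.splitOn.go]
        rw [if_pos (by simp [List.isPrefixOf])]
        have hdrop : List.drop (['$'].length) ('$' :: rest) = rest := by simp
        rw [hdrop, ih rest [] ((cur.reverse) :: acc) (by simp at h ⊢; omega)]
        simp [pvSplit]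
      · rw [PySem.Chars.splitOn.go]
        rw [if_neg (by simp [List.isPrefixOf]; exact fun h' => hc h'.symm)]
        rw [ih rest (c :: cur) acc (by simp at h ⊢; omega)]
        simp [pvSplit, hc]

lemma pvSplitOn_eq (cs : List Char) :
    PySem.Chars.splitOn cs ['$'] = (pvSplit cs).1 :: (pvSplit cs).2 := by
  unfold PySem.Chars.splitOn
  rw [pvSplit_go (cs.length + 1) cs [] [] (by omega)]
  simp

lemma pvSplit_cons_dollar (rest : List Char) :
    pvSplit ('$' :: rest) = ([], (pvSplit rest).1 :: (pvSplit rest).2) := by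
  simp [pvSplit]

lemma pvSplit_cons_ne {c : Char} (hc : c ≠ '$') (rest : List Char) :
    pvSplit (c :: rest) = (c :: (pvSplit rest).1, (pvSplit rest).2) := by
  simp [pvSplit, hc]

lemma pvSplit_no_dollar (cs : List Char) (h : '$' ∉ cs) : (pvSplit cs).2 = [] := by
  induction cs with
  | nil => simp [pvSplit]
  | cons c rest ih =>
    simp only [List.mem_cons, not_or] at h
    simp [pvSplit, Ne.symm h.1, ih h.2]

lemma pvSegVar_cons_of_not_op {c : Char} (hop : c ∉ pvOps) (cs : List Char) :
    pvSegVar (c :: cs) =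
      (if c = ' ' then (pvSegVar cs).1 else c :: (pvSegVar cs).1, (pvSegVar cs).2) := by
  simp only [pvSegVar, if_neg hop]

lemma pvB2_op {c : Char} (hop : c ∈ pvOps) (v h : List Char) (t : List (List Char)) :
    pvB2 v (c :: h) t = String.mk v :: pvGoB t := by
  simp [pvB2, pvSegVar, hop]

lemma pvB2_space (v h : List Char) (t : List (List Char)) :
    pvB2 v (' ' :: h) t = pvB2 v h t := by
  have hop : (' ' : Char) ∉ pvOps := by decide
  simp [pvB2, pvSegVar_cons_of_not_op hop]

lemma pvB2_nil_cons (v h : List Char) (t : List (List Char)) :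
    pvB2 v [] (h :: t) = pvB2 [] h t := by
  rw [← pvGoB_eq_B2]
  simp [pvB2, pvSegVar]

lemma pvB2_char {c : Char} (hop : c ∉ pvOps) (hsp : c ≠ ' ') (v h : List Char)
    (t : List (List Char)) : pvB2 v (c :: h) t = pvB2 (v ++ [c]) h t := by
  simp [pvB2, pvSegVar_cons_of_not_op hop, hsp]

lemma pvMain (cs : List Char) : ∀ (acc : List (List Char)) (v : List Char),
    (pvFin (cs.foldl pvStepA (acc, false, [])) = acc.map String.mk ++ pvGoB (pvSplit cs).2)
    ∧ (pvFin (cs.foldl pvStepA (acc, true, v)) =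
        acc.map String.mk ++ pvB2 v (pvSplit cs).1 (pvSplit cs).2) := by
  induction cs with
  | nil =>
    intro acc v
    constructor
    · simp [pvFin, pvSplit, pvGoB]
    · simp only [List.foldl_nil, pvFin, pvSplit, pvB2, pvSegVar]
      by_cases hv : v = [] <;> simp [hv]
  | cons c rest ih =>
    intro acc v
    constructor
    · -- flag = false
      by_cases hc : c = '$'
      · subst hc
        have hstep : pvStepA (acc, false, []) '$' = (acc, true, []) := by
          simp [pvStepA]
        simp only [List.foldl_cons, hstep]
        rw [(ih acc []).2, pvSplit_cons_dollar, pvGoB_eq_B2]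
      · have hstep : pvStepA (acc, false, []) c = (acc, false, []) := by
          simp [pvStepA, hc]
        simp only [List.foldl_cons, hstep]
        rw [(ih acc []).1, pvSplit_cons_ne hc]
    · -- flag = true, pending variable v
      by_cases hc : c = '$'
      · subst hc
        have hstep : pvStepA (acc, true, v) '$' = (acc, true, []) := by
          simp [pvStepA]
        simp only [List.foldl_cons, hstep]
        rw [(ih acc []).2, pvSplit_cons_dollar]
        simp [pvB2_nil_cons]
      · by_cases hop : c ∈ pvOps
        · have hstep : pvStepA (acc, true, v) c = (acc ++ [v], false, []) := by
            simp [pvStepA, hc, hop]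
          simp only [List.foldl_cons, hstep]
          rw [(ih (acc ++ [v]) []).1, pvSplit_cons_ne hc, pvB2_op hop]
          simp
        · by_cases hsp : c = ' '
          · subst hsp
            have hstep : pvStepA (acc, true, v) ' ' = (acc, true, v) := by
              simp [pvStepA, hop]
            simp only [List.foldl_cons, hstep]
            rw [(ih acc v).2, pvSplit_cons_ne hc, pvB2_space]
          · have hstep : pvStepA (acc, true, v) c = (acc, true, v ++ [c]) := by
              simp [pvStepA, hc, hop, hsp]
            simp only [List.foldl_cons, hstep]
            rw [(ih acc (v ++ [c])).2, pvSplit_cons_ne hc, pvB2_char hop hsp]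

-- ===== VERDICT (by name: the statement is the Claim_ definition above) =====
theorem parseVariables_spec : Claim_equal_parseVariables := by
  intro expression _
  unfold Spec_parseVariables parseVariables parseVariables_alt
  rw [pvSplitOn_eq]
  simp only [List.drop_one, List.tail_cons]
  by_cases h : PySem.Str.isIn "$" expression
  · rw [if_pos h]
    have := (pvMain expression.toList [] []).1
    simpa [pvFin] using this
  · rw [if_neg h]
    have hmem : '$' ∉ expression.toList := by
      intro hm
      apply h
      rw [PySem.Str.isIn_iff_infix]
      obtain ⟨s, t, he⟩ := List.append_of_mem hm
      exact ⟨s, t, by rw [he, show "$".toList = ['$'] from by decide]; simp⟩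
    rw [pvSplit_no_dollar _ hmem]
    simp [pvGoB]
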